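-- pv_equiv track=rewrite | github.com/TaeseoungKim/Algorithm_Solution | 파이썬/프로그래머스/상담원 인원.py | getWaitTime
-- ===== SOURCE A (Python) =====
-- import heapq
--
-- def getWaitTime(mentoCase, reqs):
--     mentoQueue = [[] for i in range(len(mentoCase))]
--     waitTime = 0
--
--     for req in reqs:
--         start, time, case = req
--         if len(mentoQueue[case-1]) < mentoCase[case-1]:
--             heapq.heappush(mentoQueue[case-1], start+time)
--         else:
--             endTime = heapq.heappop(mentoQueue[case-1])
--             if endTime > start:
--                 waitTime += endTime - start
--                 heapq.heappush(mentoQueue[case-1], endTime+time)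
--             else:
--                 heapq.heappush(mentoQueue[case-1], start+time)
--     return waitTime
-- ===== SOURCE B (Python) =====
-- def getWaitTime(mentoCase, reqs):
--     # staged per-case simulation: cases are independent, so handle each case's
--     # requests in its own pass with a plain list of finish times (no heapq)
--     total = 0
--     for case in dict.fromkeys(c for _, _, c in reqs):
--         cap = mentoCase[case - 1]
--         finishes = []
--         for start, time, c in reqs:
--             if c != case:
--                 continue
--             if len(finishes) < cap:
--                 finishes.append(start + time)
--             else:
--                 m = min(finishes)
--                 finishes.remove(m)
--                 if m > start:
--                     total += m - start
--                     finishes.append(m + time)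
--                 else:
--                     finishes.append(start + time)
--     return total
-- ===== Notes on version B (the rewrite author's own statement) =====
-- stated objective: alternative
-- what changed: Replaces the single interleaved pass with per-case heapq queues by a staged simulation: one plain pass per distinct case value (dict.fromkeys dedup) over that case's own requests, keeping an unordered list of finish times and popping via min()/remove().
-- outside the precondition, e.g. on getWaitTime([1], [(0, 5, 0), (0, 5, 1)]): A returns 5, B returns 0
import Mathlib
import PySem

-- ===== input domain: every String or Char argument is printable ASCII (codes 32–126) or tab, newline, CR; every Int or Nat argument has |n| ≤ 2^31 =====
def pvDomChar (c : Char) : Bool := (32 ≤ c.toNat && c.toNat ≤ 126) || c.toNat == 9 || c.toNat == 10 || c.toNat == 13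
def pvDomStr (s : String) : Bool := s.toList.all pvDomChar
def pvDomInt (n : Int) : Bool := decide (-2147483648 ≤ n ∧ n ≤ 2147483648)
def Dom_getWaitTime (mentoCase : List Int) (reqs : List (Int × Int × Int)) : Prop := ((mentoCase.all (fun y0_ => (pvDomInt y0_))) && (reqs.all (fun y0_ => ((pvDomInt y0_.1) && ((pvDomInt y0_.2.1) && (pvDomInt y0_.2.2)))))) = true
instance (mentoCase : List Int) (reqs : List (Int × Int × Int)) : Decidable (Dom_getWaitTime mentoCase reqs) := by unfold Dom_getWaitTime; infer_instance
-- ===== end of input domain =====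

-- B replaces A's single interleaved pass with per-case heapq queues by a staged simulation:
-- one plain pass per distinct case value over that case's own requests, with an unordered
-- list of finish times popped via min()/remove() (objective: alternative).
-- Return value only; no mutation.

-- ===== PORT A =====
-- A's heap list is observed only through len / heappush / heappop, so the heapq heap is
-- ported at its contract as a sorted list: push = ordered insert, pop = take the head.
-- This is exact for A's use of heapq (pop always returns the minimum, len is the size).
def heapPush (q : List Int) (x : Int) : List Int := List.orderedInsert (· ≤ ·) x q

def stepA (mentoCase : List Int) (st : List (List Int) × Int) (req : Int × Int × Int) : List (List Int) × Int :=
  match st, req with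
  | (queues, wait), (start, time, c) =>
    match PySem.List.pyGet? queues (c - 1), PySem.List.pyGet? mentoCase (c - 1) with
    | some q, some cap =>
        if (q.length : Int) < cap then
          (PySem.List.pySetD queues (c - 1) (heapPush q (start + time)), wait)
        else
          match q with
          | [] => (queues, wait)        -- heappop of an empty heap: IndexError, excluded by Pre_
          | endTime :: rest =>
            if endTime > start then
              (PySem.List.pySetD queues (c - 1) (heapPush rest (endTime + time)), wait + (endTime - start))
            else
              (PySem.List.pySetD queues (c - 1) (heapPush rest (start + time)), wait)
    | _, _ => (queues, wait)            -- IndexError, excluded by Pre_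

def getWaitTime (mentoCase : List Int) (reqs : List (Int × Int × Int)) : Int :=
  (reqs.foldl (stepA mentoCase) (List.replicate mentoCase.length [], 0)).2

-- ===== PORT B =====
-- inner loop body of Source B: one request seen by the pass for case `kase` with capacity `cap`
def stepCase (cap kase : Int) (st : List Int × Int) (req : Int × Int × Int) : List Int × Int :=
  match st, req with
  | (fins, total), (start, time, c) =>
    if c ≠ kase then (fins, total)      -- continue
    else if (fins.length : Int) < cap then (fins ++ [start + time], total)
    else
      match PySem.List.min? fins (fun x => x) with
      | none => (fins, total)           -- min() of an empty list: ValueError, excluded by Pre_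
      | some m =>
        match PySem.List.remove? fins m with
        | none => (fins, total)         -- unreachable: m ∈ fins
        | some fins' =>
          if m > start then (fins' ++ [m + time], total + (m - start))
          else (fins' ++ [start + time], total)

-- outer loop of Source B: one pass per distinct case value (dict.fromkeys dedup, insertion order)
def getWaitTime_alt (mentoCase : List Int) (reqs : List (Int × Int × Int)) : Int :=
  (PySem.Set.ofList (reqs.map (fun r => r.2.2))).foldl
    (fun total kase =>
      (reqs.foldl (stepCase (PySem.List.pyGetD mentoCase (kase - 1) 0) kase) ([], total)).2)
    0

-- ===== PRECONDITION & SPEC =====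
-- the Nat index Python's rules resolve index i to, for a list of length n
def nidx (n : Nat) (i : Int) : Nat := if 0 ≤ i then i.toNat else n - (-i).toNat

-- Pre_ excludes (a) inputs referencing a case whose capacity is ≤ 0 or whose number does not
-- index into mentoCase — there A raises IndexError and B raises IndexError/ValueError — and
-- (b) inputs where two DIFFERENT case numbers alias the SAME queue through Python's negative
-- indexing (e.g. 0 and len): merging those two labels into one queue is an accident of A's
-- index arithmetic no caller means, and B keeps them separate.
def Pre_getWaitTime (mentoCase : List Int) (reqs : List (Int × Int × Int)) : Prop :=
  (∀ r ∈ reqs, PySem.Raise.InRange mentoCase.length (r.2.2 - 1) ∧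
      1 ≤ mentoCase.getD (nidx mentoCase.length (r.2.2 - 1)) 0) ∧
  (∀ r ∈ reqs, ∀ r' ∈ reqs,
      nidx mentoCase.length (r.2.2 - 1) = nidx mentoCase.length (r'.2.2 - 1) → r.2.2 = r'.2.2)
instance (mentoCase : List Int) (reqs : List (Int × Int × Int)) : Decidable (Pre_getWaitTime mentoCase reqs) := by unfold Pre_getWaitTime; infer_instance

def pvWitness_getWaitTime : List Int × (List (Int × Int × Int)) := ([1, 2], [(0, 5, 1), (1, 3, 1), (2, 4, 2)])

def Spec_getWaitTime (mentoCase : List Int) (reqs : List (Int × Int × Int)) (out : Int) : Prop := out = getWaitTime_alt mentoCase reqs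
instance (mentoCase : List Int) (reqs : List (Int × Int × Int)) (out : Int) : Decidable (Spec_getWaitTime mentoCase reqs out) := by unfold Spec_getWaitTime; infer_instance

-- ===== CLAIM (what is proved, stated in full; the proofs are below) =====
def Claim_equal_getWaitTime : Prop := ∀ (mentoCase : List Int) (reqs : List (Int × Int × Int)), Dom_getWaitTime mentoCase reqs → Pre_getWaitTime mentoCase reqs → Spec_getWaitTime mentoCase reqs (getWaitTime mentoCase reqs)

-- ===== LEMMAS AND PROOFS =====

-- the per-case simulation of Source B's inner loop, started with wait 0
def simQ (cap kase : Int) (fins : List Int) (reqs : List (Int × Int × Int)) : List Int :=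
  (reqs.foldl (stepCase cap kase) (fins, 0)).1
def simW (cap kase : Int) (fins : List Int) (reqs : List (Int × Int × Int)) : Int :=
  (reqs.foldl (stepCase cap kase) (fins, 0)).2

lemma stepCase_shift (cap kase : Int) (fins : List Int) (total : Int) (r : Int × Int × Int) :
    stepCase cap kase (fins, total) r
      = ((stepCase cap kase (fins, 0) r).1, total + (stepCase cap kase (fins, 0) r).2) := by
  obtain ⟨s, t, c⟩ := r
  simp only [stepCase]
  split_ifs with h1 h2
  · simp
  · simp
  · cases hm : PySem.List.min? fins (fun x => x) with
    | none => simp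
    | some m =>
      cases hr : PySem.List.remove? fins m with
      | none => simp [hr]
      | some fins' =>
        simp only [hr]
        split_ifs with h3 <;> simp

lemma foldl_stepCase_shift (cap kase : Int) (reqs : List (Int × Int × Int)) :
    ∀ (fins : List Int) (total : Int),
      reqs.foldl (stepCase cap kase) (fins, total)
        = (simQ cap kase fins reqs, total + simW cap kase fins reqs) := by
  induction reqs with
  | nil => intro fins total; simp [simQ, simW]
  | cons r rs ih =>
    intro fins total
    simp only [List.foldl_cons, simQ, simW]
    rw [stepCase_shift cap kase fins total r, ih, ih]
    simp [add_assoc]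

lemma simW_cons (cap kase : Int) (fins : List Int) (r : Int × Int × Int)
    (rs : List (Int × Int × Int)) :
    simW cap kase fins (r :: rs)
      = (stepCase cap kase (fins, 0) r).2 + simW cap kase (stepCase cap kase (fins, 0) r).1 rs := by
  simp only [simW, List.foldl_cons]
  have h : stepCase cap kase (fins, 0) r
      = ((stepCase cap kase (fins, 0) r).1, (stepCase cap kase (fins, 0) r).2) := rfl
  rw [h, foldl_stepCase_shift]
  rfl

lemma stepCase_skip (cap kase : Int) (fins : List Int) (total s t c : Int) (h : c ≠ kase) :
    stepCase cap kase (fins, total) (s, t, c) = (fins, total) := by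
  simp [stepCase, h]

lemma nidx_lt {n : Nat} {i : Int} (h : PySem.Raise.InRange n i) : nidx n i < n := by
  rcases h with ⟨h1, h2⟩
  unfold nidx
  split_ifs with h0 <;> omega

lemma pyIdx?_eq_nidx (n : Nat) (i : Int) (h : PySem.Raise.InRange n i) :
    PySem.List.pyIdx? n i = some (nidx n i) := by
  rcases h with ⟨h1, h2⟩
  by_cases h0 : 0 ≤ i
  · simp only [PySem.List.pyIdx?, nidx, if_pos h0, if_pos h2]
  · simp only [PySem.List.pyIdx?, nidx, if_neg h0, if_pos h1]

lemma pyGet?_nidx {α : Type} (xs : List α) (i : Int) (h : PySem.Raise.InRange xs.length i) :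
    PySem.List.pyGet? xs i = xs[nidx xs.length i]? := by
  simp only [PySem.List.pyGet?, pyIdx?_eq_nidx _ _ h]
  rfl

lemma pyGetD_nidx {α : Type} (xs : List α) (i : Int) (d : α)
    (h : PySem.Raise.InRange xs.length i) :
    PySem.List.pyGetD xs i d = xs.getD (nidx xs.length i) d := by
  simp only [PySem.List.pyGetD, PySem.List.pyGet?, pyIdx?_eq_nidx _ _ h, List.getD]
  rfl

lemma pySetD_nidx {α : Type} (xs : List α) (i : Int) (v : α) (h : PySem.Raise.InRange xs.length i) :
    PySem.List.pySetD xs i v = xs.set (nidx xs.length i) v := by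
  simp only [PySem.List.pySetD, PySem.List.pySet?, pyIdx?_eq_nidx _ _ h, Option.map_some,
    Option.getD_some]

lemma min_eq_head {m : Int} {rest qb : List Int}
    (hs : (m :: rest).Pairwise (· ≤ ·)) (hp : (m :: rest).Perm qb) :
    PySem.List.min? qb (fun x : Int => x) = some m := by
  have hm : m ∈ qb := hp.mem_iff.mp (List.mem_cons_self)
  have hne : PySem.List.min? qb (fun x : Int => x) ≠ none := by
    intro hnil
    rw [PySem.List.min?_eq_none_iff] at hnil
    subst hnil
    exact absurd hm (List.not_mem_nil)
  obtain ⟨m', hm'⟩ := Option.isSome_iff_exists.mp (Option.isSome_iff_ne_none.mpr hne)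
  rw [hm']
  have hmem' : m' ∈ qb := PySem.List.min?_mem hm'
  have h1 : m' ≤ m := PySem.List.min?_isMin hm' m hm
  have h2 : m ≤ m' := by
    have hmr : m' ∈ m :: rest := hp.mem_iff.mpr hmem'
    rcases List.mem_cons.mp hmr with h | h
    · omega
    · exact (List.pairwise_cons.mp hs).1 m' h
  have : m = m' := le_antisymm h2 h1
  rw [this]

-- replace the summand at the one occurrence of c in a duplicate-free list
lemma map_sum_peel (l : List Int) (hnd : l.Nodup) (c : Int) (hc : c ∈ l) (δ : Int)
    (F G : Int → Int) (h0 : F c = δ + G c) (hne : ∀ v ∈ l, v ≠ c → F v = G v) :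
    (l.map F).sum = δ + (l.map G).sum := by
  induction l with
  | nil => exact absurd hc (List.not_mem_nil)
  | cons x xs ih =>
    have hx : x ∉ xs := (List.nodup_cons.mp hnd).1
    have hnd' : xs.Nodup := (List.nodup_cons.mp hnd).2
    rcases List.mem_cons.mp hc with hcx | hcxs
    · subst hcx
      have heq : xs.map F = xs.map G := by
        refine List.map_congr_left ?_
        intro v hv
        exact hne v (List.mem_cons_of_mem _ hv) (fun hvc => hx (hvc ▸ hv))
      simp only [List.map_cons, List.sum_cons, h0, heq]
      ring
    · have hxc : x ≠ c := fun h => hx (h ▸ hcxs)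
      have hFx : F x = G x := hne x List.mem_cons_self hxc
      simp only [List.map_cons, List.sum_cons, hFx,
        ih hnd' hcxs (fun v hv hvc => hne v (List.mem_cons_of_mem _ hv) hvc)]
      ring

lemma getD_set_self {α : Type} (xs : List α) (i : Nat) (h : i < xs.length) (v d : α) :
    (xs.set i v).getD i d = v := by
  rw [List.getD_eq_getElem _ _ (by simpa using h), List.getElem_set_self (by simpa using h)]

lemma getD_set_ne {α : Type} (xs : List α) (i j : Nat) (hne : j ≠ i) (v d : α) :
    (xs.set i v).getD j d = xs.getD j d := by
  by_cases hj : j < xs.length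
  · rw [List.getD_eq_getElem _ _ (by simpa using hj),
      List.getElem_set_ne (fun hh => hne hh.symm), List.getD_eq_getElem _ _ hj]
  · rw [List.getD_eq_default _ _ (by simpa using Nat.le_of_not_lt hj),
      List.getD_eq_default _ _ (Nat.le_of_not_lt hj)]

-- main invariant: A's interleaved fold equals the sum of B's per-case simulations, where
-- A's queue at the resolved index of case v is a sorted permutation of B's list for v
lemma fold_split (mc : List Int) (seen0 : List Int) (reqs : List (Int × Int × Int)) :
    ∀ (qa : List (List Int)) (fb : Int → List Int) (w : Int),
      (∀ r ∈ reqs, r.2.2 ∈ seen0) →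
      (∀ v ∈ seen0, PySem.Raise.InRange mc.length (v - 1) ∧
          1 ≤ mc.getD (nidx mc.length (v - 1)) 0) →
      (∀ v ∈ seen0, ∀ v' ∈ seen0,
          nidx mc.length (v - 1) = nidx mc.length (v' - 1) → v = v') →
      seen0.Nodup →
      qa.length = mc.length →
      (∀ v ∈ seen0, (qa.getD (nidx mc.length (v - 1)) []).Pairwise (· ≤ ·) ∧
          (qa.getD (nidx mc.length (v - 1)) []).Perm (fb v)) →
      (reqs.foldl (stepA mc) (qa, w)).2
        = w + (seen0.map (fun v =>
            simW (PySem.List.pyGetD mc (v - 1) 0) v (fb v) reqs)).sum := by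
  induction reqs with
  | nil =>
    intro qa fb w _ _ _ _ _ _
    have hz : ∀ v ∈ seen0,
        (fun v => simW (PySem.List.pyGetD mc (v - 1) 0) v (fb v) []) v = (fun _ => (0 : Int)) v :=
      fun v _ => rfl
    simp [List.map_congr_left hz]
  | cons r rs ih =>
    intro qa fb w hin hok hinj hnd hla hrel
    obtain ⟨s, t, c⟩ := r
    have hcseen : c ∈ seen0 := hin (s, t, c) List.mem_cons_self
    obtain ⟨hir, hcap1⟩ := hok c hcseen
    set n := mc.length with hn
    set j0 : Nat := nidx n (c - 1) with hj0
    have hj0n : j0 < n := nidx_lt hir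
    have hj0a : j0 < qa.length := by omega
    have hga : PySem.List.pyGet? qa (c - 1) = some (qa.getD j0 []) := by
      rw [pyGet?_nidx _ _ (by rw [hla]; exact hir)]
      rw [show nidx qa.length (c - 1) = j0 by rw [hla]]
      rw [List.getD_eq_getElem _ _ hj0a]
      exact List.getElem?_eq_getElem hj0a
    have hgm : PySem.List.pyGet? mc (c - 1) = some (mc.getD j0 0) := by
      rw [pyGet?_nidx _ _ hir, List.getD_eq_getElem _ _ (by omega)]
      exact List.getElem?_eq_getElem (by omega)
    have hgb : PySem.List.pyGetD mc (c - 1) 0 = mc.getD j0 0 := pyGetD_nidx _ _ _ hir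
    have hsa : ∀ v, PySem.List.pySetD qa (c - 1) v = qa.set j0 v := by
      intro v
      rw [pySetD_nidx _ _ _ (by rw [hla]; exact hir)]
      rw [show nidx qa.length (c - 1) = j0 by rw [hla]]
    set cap : Int := mc.getD j0 0 with hcapd
    set qj : List Int := qa.getD j0 [] with hqj
    set bj : List Int := fb c with hbj
    obtain ⟨hsort, hperm⟩ := hrel c hcseen
    rw [← hqj] at hsort hperm
    rw [← hbj] at hperm
    have hqlen : qj.length = bj.length := hperm.length_eq
    -- compute B's head step for the pass of case c and A's head step, in parallel
    have hmain : ∃ (qa' bj' : List Int) (δ : Int),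
        stepA mc (qa, w) (s, t, c) = (qa.set j0 qa', w + δ) ∧
        stepCase cap c (bj, 0) (s, t, c) = (bj', δ) ∧
        qa'.Pairwise (· ≤ ·) ∧ qa'.Perm bj' := by
      by_cases hlt : (qj.length : Int) < cap
      · refine ⟨heapPush qj (s + t), bj ++ [s + t], 0, ?_, ?_, ?_, ?_⟩
        · simp only [stepA, hga, hgm, if_pos hlt, hsa]
          simp
        · simp only [stepCase]
          rw [if_neg (by simp), if_pos (by omega)]
        · exact List.Pairwise.orderedInsert (s + t) _ hsort
        · exact (List.perm_orderedInsert _ _ _).trans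
            ((hperm.cons _).trans (List.perm_append_singleton _ _).symm)
      · match hqa : qj, hsort, hperm, hqlen, hlt with
        | [], _, _, _, hlt => exact absurd hcap1 (by simp at hlt; omega)
        | m :: rest, hsort, hperm, hqlen, hlt =>
          have hmin : PySem.List.min? bj (fun x : Int => x) = some m := min_eq_head hsort hperm
          have hmem : m ∈ bj := hperm.mem_iff.mp List.mem_cons_self
          have hrem : PySem.List.remove? bj m = some (bj.erase m) :=
            PySem.List.remove?_eq_some_erase _ _ hmem
          have hpe : rest.Perm (bj.erase m) := by
            have h := hperm.erase m
            rwa [List.erase_cons_head] at h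
          have hst : rest.Pairwise (· ≤ ·) := hsort.of_cons
          by_cases hgt : m > s
          · refine ⟨heapPush rest (m + t), bj.erase m ++ [m + t], m - s, ?_, ?_, ?_, ?_⟩
            · simp only [stepA, hga, hgm, if_neg hlt, if_pos hgt, hsa]
            · simp only [stepCase, hmin, hrem]
              rw [if_neg (by simp), if_neg (by omega), if_pos hgt]
              simp
            · exact List.Pairwise.orderedInsert (m + t) _ hst
            · exact (List.perm_orderedInsert _ _ _).trans
                ((hpe.cons _).trans (List.perm_append_singleton _ _).symm)
          · refine ⟨heapPush rest (s + t), bj.erase m ++ [s + t], 0, ?_, ?_, ?_, ?_⟩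
            · simp only [stepA, hga, hgm, if_neg hlt, if_neg hgt, hsa]
              simp
            · simp only [stepCase, hmin, hrem]
              rw [if_neg (by simp), if_neg (by omega), if_neg hgt]
            · exact List.Pairwise.orderedInsert (s + t) _ hst
            · exact (List.perm_orderedInsert _ _ _).trans
                ((hpe.cons _).trans (List.perm_append_singleton _ _).symm)
    obtain ⟨qa', bj', δ, hstepA, hstepB, hsort', hperm'⟩ := hmain
    -- apply the IH to the updated state
    have hrel' : ∀ v ∈ seen0,
        ((qa.set j0 qa').getD (nidx n (v - 1)) []).Pairwise (· ≤ ·) ∧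
        ((qa.set j0 qa').getD (nidx n (v - 1)) []).Perm (Function.update fb c bj' v) := by
      intro v hv
      by_cases hvc : v = c
      · subst hvc
        rw [← hj0, getD_set_self qa j0 hj0a qa' [], Function.update_self]
        exact ⟨hsort', hperm'⟩
      · have hne : nidx n (v - 1) ≠ j0 := fun h => hvc (hinj v hv c hcseen (h.trans hj0.symm ▸ h))
        rw [getD_set_ne qa j0 (nidx n (v - 1)) hne qa' [], Function.update_of_ne hvc]
        exact hrel v hv
    have hihs := ih (qa.set j0 qa') (Function.update fb c bj') (w + δ)
      (fun r' hr' => hin r' (List.mem_cons_of_mem _ hr')) hok hinj hnd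
      (by simp [hla]) hrel'
    simp only [List.foldl_cons, hstepA, hihs]
    -- peel the head request off each per-case simulation
    rw [map_sum_peel seen0 hnd c hcseen δ
      (fun v => simW (PySem.List.pyGetD mc (v - 1) 0) v (fb v) ((s, t, c) :: rs))
      (fun v => simW (PySem.List.pyGetD mc (v - 1) 0) v (Function.update fb c bj' v) rs)
      ?_ ?_]
    · ring
    · -- v = c: the head request belongs to this pass and contributes δ
      dsimp only
      rw [simW_cons, hgb, ← hbj, hstepB, Function.update_self]
    · -- v ≠ c: the head request is skipped by this pass
      intro v hv hvc
      dsimp only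
      rw [simW_cons, stepCase_skip _ _ _ _ _ _ _ (fun h => hvc h.symm),
        Function.update_of_ne hvc]
      simp

-- B's outer loop over the distinct case values is the sum of the per-case simulations
lemma alt_eq_mapsum (mc : List Int) (reqs : List (Int × Int × Int)) :
    getWaitTime_alt mc reqs
      = ((PySem.Set.ofList (reqs.map (fun r => r.2.2))).map (fun v =>
          simW (PySem.List.pyGetD mc (v - 1) 0) v [] reqs)).sum := by
  unfold getWaitTime_alt
  have hbody : ∀ (l : List Int) (total : Int),
      l.foldl (fun tot kase =>
        (reqs.foldl (stepCase (PySem.List.pyGetD mc (kase - 1) 0) kase) ([], tot)).2) total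
      = total + (l.map (fun kase =>
          simW (PySem.List.pyGetD mc (kase - 1) 0) kase [] reqs)).sum := by
    intro l
    induction l with
    | nil => intro total; simp
    | cons k ks ihk =>
      intro total
      simp only [List.foldl_cons, List.map_cons, List.sum_cons]
      rw [foldl_stepCase_shift, ihk]
      ring
  rw [hbody, zero_add]

-- ===== VERDICT (by name: the statement is the Claim_ definition above) =====
theorem getWaitTime_spec : Claim_equal_getWaitTime := by
  intro mc reqs _ hpre
  obtain ⟨hok, hinj⟩ := hpre
  unfold Spec_getWaitTime getWaitTime
  rw [alt_eq_mapsum]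
  set seen : List Int := PySem.Set.ofList (reqs.map (fun r => r.2.2)) with hseen
  have hmem : ∀ k : Int, k ∈ seen ↔ ∃ r ∈ reqs, r.2.2 = k := by
    intro k
    simp [hseen, PySem.Set.mem_ofList]
  rw [fold_split mc seen reqs (List.replicate mc.length []) (fun _ => []) 0
    (fun r hr => (hmem r.2.2).mpr ⟨r, hr, rfl⟩)
    (by
      intro v hv
      obtain ⟨r, hr, hrv⟩ := (hmem v).mp hv
      exact hrv ▸ hok r hr)
    (by
      intro v hv v' hv' h
      obtain ⟨r, hr, hrv⟩ := (hmem v).mp hv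
      obtain ⟨r', hr', hrv'⟩ := (hmem v').mp hv'
      subst hrv hrv'
      exact hinj r hr r' hr' h)
    (PySem.Set.nodup_ofList _)
    (by simp)
    (by
      intro v hv
      have hvlt : nidx mc.length (v - 1) < mc.length := by
        obtain ⟨r, hr, hrv⟩ := (hmem v).mp hv
        exact nidx_lt (hrv ▸ (hok r hr).1)
      rw [List.getD_replicate _ hvlt]
      exact ⟨List.Pairwise.nil, List.Perm.refl _⟩)]
  rw [zero_add]
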